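-- pv_equiv track=rewrite | github.com/several-club/sevclub | mark_decorative_and_lcp.py | serialize_img
-- ===== SOURCE A (Python) =====
-- from typing import Dict, List, Optional, Tuple
--
-- def serialize_img(attrs: Dict[str, str]) -> str:
--     # Ensure deterministic order: src, alt, fetchpriority, loading, decoding, width, height, then others
--     order = ["src", "alt", "fetchpriority", "loading", "decoding", "width", "height"]
--     parts: List[str] = ["<img"]
--     used = set()
--     for key in order:
--         if key in attrs and attrs[key] is not None:
--             parts.append(f"{key}=\"{attrs[key]}\"")
--             used.add(key)
--     for k, v in attrs.items():
--         if k in used: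
--             continue
--         parts.append(f"{k}=\"{v}\"")
--     return " ".join(parts) + ">"
-- ===== SOURCE B (Python) =====
-- def serialize_img(attrs):
--     # Rank-and-sort: one pass assigns each attribute a sort rank (priority keys get
--     # their index in the fixed order, the rest keep insertion position after them),
--     # then a single stable sort + join emits the tag.
--     order = ["src", "alt", "fetchpriority", "loading", "decoding", "width", "height"]
--     rank = {k: i for i, k in enumerate(order)}
--     items = sorted(enumerate(attrs.items()), key=lambda p: rank.get(p[1][0], len(order) + p[0]))
--     return "<img" + "".join(f' {k}="{v}"' for _, (k, v) in items) + ">"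
-- ===== Notes on version B (the rewrite author's own statement) =====
-- stated objective: alternative
-- what changed: Replaces A's two sequential emission loops (a scan over the priority list with dict lookups and a 'used' set, then a second pass over the items) by computing a sort rank for every item in one pass and emitting a single stably-sorted sequence.
import Mathlib
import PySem

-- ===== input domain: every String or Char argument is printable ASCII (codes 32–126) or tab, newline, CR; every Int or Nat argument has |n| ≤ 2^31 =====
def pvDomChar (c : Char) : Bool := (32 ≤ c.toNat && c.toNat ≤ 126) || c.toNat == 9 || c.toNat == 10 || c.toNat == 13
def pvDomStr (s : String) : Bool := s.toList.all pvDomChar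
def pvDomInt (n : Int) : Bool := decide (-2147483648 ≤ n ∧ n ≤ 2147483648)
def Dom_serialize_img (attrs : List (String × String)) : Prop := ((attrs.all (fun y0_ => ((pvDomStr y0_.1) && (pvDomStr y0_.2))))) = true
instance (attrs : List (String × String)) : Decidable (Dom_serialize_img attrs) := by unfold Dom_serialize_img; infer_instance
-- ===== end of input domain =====

-- B replaces A's two emission loops by a rank-per-item computation and one stable sort;
-- equivalence of the return values is proved for duplicate-free key lists (Python dicts).

-- the fixed priority order, shared by both Pythons
def pvOrder : List String := ["src", "alt", "fetchpriority", "loading", "decoding", "width", "height"]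

-- ===== PORT A =====
def serialize_img (attrs : List (String × String)) : String :=
  let st := pvOrder.foldl
    (fun (st : List String × PySem.Set String) key =>
      match (PySem.Dict.mk attrs).get? key with
      | some v => (st.1 ++ [key ++ "=\"" ++ v ++ "\""], PySem.Set.add st.2 key)
      | none => st)
    (["<img"], PySem.Set.empty)
  let parts := attrs.foldl
    (fun ps kv => if PySem.Set.contains st.2 kv.1 then ps else ps ++ [kv.1 ++ "=\"" ++ kv.2 ++ "\""])
    st.1
  PySem.Str.join " " parts ++ ">"

-- ===== PORT B =====
-- rank = {k: i for i, k in enumerate(order)}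
def pvRank : PySem.Dict String Int :=
  PySem.Dict.ofList ((PySem.List.enumerate pvOrder).map (fun p => (p.2, p.1)))

-- key=lambda p: rank.get(p[1][0], len(order) + p[0])
def pvKey (p : Int × (String × String)) : Int :=
  PySem.Dict.getD pvRank p.2.1 ((pvOrder.length : Int) + p.1)

def serialize_img_alt (attrs : List (String × String)) : String :=
  let items := PySem.List.sorted (PySem.List.enumerate attrs) pvKey
  "<img" ++ PySem.Str.join "" (items.map (fun p => " " ++ p.2.1 ++ "=\"" ++ p.2.2 ++ "\"")) ++ ">"

-- ===== PRECONDITION & SPEC =====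
-- Pre_ requires pairwise-distinct keys: the Python argument is a dict, which cannot hold
-- duplicate keys, so association lists with repeated keys represent no Python input.
def Pre_serialize_img (attrs : List (String × String)) : Prop := (attrs.map (fun kv => kv.1)).Nodup
instance (attrs : List (String × String)) : Decidable (Pre_serialize_img attrs) := by unfold Pre_serialize_img; infer_instance
def pvWitness_serialize_img : (List (String × String)) := [("class", "pic"), ("src", "a.png"), ("alt", "A")]

def Spec_serialize_img (attrs : List (String × String)) (out : String) : Prop := out = serialize_img_alt attrs
instance (attrs : List (String × String)) (out : String) : Decidable (Spec_serialize_img attrs out) := by unfold Spec_serialize_img; infer_instance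

-- ===== CLAIM (what is proved, stated in full; the proofs are below) =====
def Claim_equal_serialize_img : Prop := ∀ (attrs : List (String × String)), Dom_serialize_img attrs → Pre_serialize_img attrs → Spec_serialize_img attrs (serialize_img attrs)

-- ===== LEMMAS AND PROOFS =====

theorem pvKey_eq (p : Int × (String × String)) :
    pvKey p = if p.2.1 = "src" then 0 else if p.2.1 = "alt" then 1 else
      if p.2.1 = "fetchpriority" then 2 else if p.2.1 = "loading" then 3 else
      if p.2.1 = "decoding" then 4 else if p.2.1 = "width" then 5 else
      if p.2.1 = "height" then 6 else 7 + p.1 := by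
  have h : pvRank = PySem.Dict.mk [("src",(0:Int)),("alt",1),("fetchpriority",2),("loading",3),("decoding",4),("width",5),("height",6)] := by rfl
  obtain ⟨i, k, v⟩ := p
  unfold pvKey
  rw [h]
  simp only [PySem.Dict.getD, PySem.Dict.get?_mk_cons, beq_iff_eq]
  norm_num [pvOrder, eq_comm]
  split_ifs <;> simp_all [PySem.Dict.get?, Option.getD]

theorem pvKey_of_not_mem (p : Int × (String × String)) (h : p.2.1 ∉ pvOrder) :
    pvKey p = 7 + p.1 := by
  rw [pvKey_eq]
  simp [pvOrder] at h
  simp [h.1, h.2.1, h.2.2.1, h.2.2.2.1, h.2.2.2.2.1, h.2.2.2.2.2.1, h.2.2.2.2.2.2]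

theorem pvKey_le_of_mem (p : Int × (String × String)) (h : p.2.1 ∈ pvOrder) :
    pvKey p ≤ 6 := by
  rw [pvKey_eq]
  simp [pvOrder] at h
  rcases h with h|h|h|h|h|h|h <;> simp [h]

theorem find_key {attrs : List (String × String)} {k : String} {x : Int × (String × String)}
    (h : (PySem.List.enumerate attrs).find? (fun p => p.2.1 == k) = some x) :
    x.2.1 = k ∧ x ∈ PySem.List.enumerate attrs := by
  refine ⟨?_, List.mem_of_find?_eq_some h⟩
  have := List.find?_some h
  simpa using this

theorem enum_key_unique {attrs : List (String × String)} (hpre : (attrs.map (fun kv => kv.1)).Nodup)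
    {a b : Int × (String × String)} (ha : a ∈ PySem.List.enumerate attrs)
    (hb : b ∈ PySem.List.enumerate attrs) (hk : a.2.1 = b.2.1) : a = b := by
  rw [PySem.List.mem_enumerate_iff] at ha hb
  obtain ⟨i, hi, rfl⟩ := ha
  obtain ⟨j, hj, rfl⟩ := hb
  simp only at hk
  have hi' : i < (attrs.map (fun kv => kv.1)).length := by simpa using hi
  have hj' : j < (attrs.map (fun kv => kv.1)).length := by simpa using hj
  have : (attrs.map (fun kv => kv.1))[i] = (attrs.map (fun kv => kv.1))[j] := by
    simpa using hk
  have hij : i = j := (hpre.getElem_inj_iff (hi := hi') (hj := hj')).mp this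
  subst hij
  rfl

def pvP (attrs : List (String × String)) : List (Int × (String × String)) :=
  pvOrder.filterMap (fun k => (PySem.List.enumerate attrs).find? (fun p => p.2.1 == k))

def pvR (attrs : List (String × String)) : List (Int × (String × String)) :=
  (PySem.List.enumerate attrs).filter (fun p => !(pvOrder.contains p.2.1))

theorem pairwise_pvP (attrs : List (String × String)) :
    List.Pairwise (fun a b => pvKey a < pvKey b) (pvP attrs) := by
  rw [pvP, List.pairwise_filterMap, List.pairwise_iff_getElem]
  intro i j hi hj hij
  have h7 : pvOrder.length = 7 := by rfl
  rw [h7] at hi hj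
  intro b hb b' hb'
  have h1 := find_key hb
  have h2 := find_key hb'
  rw [pvKey_eq, pvKey_eq, h1.1, h2.1]
  interval_cases i <;> interval_cases j <;> first | omega | simp [pvOrder]

theorem pairwise_pvR (attrs : List (String × String)) :
    List.Pairwise (fun a b => pvKey a < pvKey b) (pvR attrs) := by
  have base := (PySem.List.pairwise_lt_enumerate attrs 0).filter
    (fun p => !(pvOrder.contains p.2.1))
  refine base.imp_of_mem ?_
  intro a b ha hb hlt
  have ha' : a.2.1 ∉ pvOrder := by
    have := (List.mem_filter.mp ha).2
    simpa using this
  have hb' : b.2.1 ∉ pvOrder := by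
    have := (List.mem_filter.mp hb).2
    simpa using this
  rw [pvKey_of_not_mem a ha', pvKey_of_not_mem b hb']
  omega

theorem mem_pvP_iff {attrs : List (String × String)} (hpre : (attrs.map (fun kv => kv.1)).Nodup)
    (x : Int × (String × String)) :
    x ∈ pvP attrs ↔ x ∈ PySem.List.enumerate attrs ∧ x.2.1 ∈ pvOrder := by
  constructor
  · intro hx
    obtain ⟨k, hk, hfind⟩ := List.mem_filterMap.mp hx
    have h := find_key hfind
    exact ⟨h.2, h.1 ▸ hk⟩
  · rintro ⟨hx, hk⟩
    have hsome : ((PySem.List.enumerate attrs).find? (fun p => p.2.1 == x.2.1)).isSome := by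
      rw [List.find?_isSome]
      exact ⟨x, hx, by simp⟩
    obtain ⟨y, hy⟩ := Option.isSome_iff_exists.mp hsome
    have h := find_key hy
    have hyx : y = x := enum_key_unique hpre h.2 hx h.1
    rw [hyx] at hy
    exact List.mem_filterMap.mpr ⟨x.2.1, hk, hy⟩

theorem nodup_of_pairwise_key {l : List (Int × (String × String))}
    (h : List.Pairwise (fun a b => pvKey a < pvKey b) l) : l.Nodup := by
  refine h.imp ?_
  intro a b hlt heq
  rw [heq] at hlt
  omega

theorem nodup_enumerate (attrs : List (String × String)) :
    (PySem.List.enumerate attrs).Nodup := by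
  refine (PySem.List.pairwise_lt_enumerate attrs 0).imp ?_
  intro a b hlt heq
  rw [heq] at hlt
  omega

theorem perm_pvPR {attrs : List (String × String)} (hpre : (attrs.map (fun kv => kv.1)).Nodup) :
    (pvP attrs ++ pvR attrs).Perm (PySem.List.enumerate attrs) := by
  have hPF : (pvP attrs).Perm
      ((PySem.List.enumerate attrs).filter (fun p => pvOrder.contains p.2.1)) := by
    refine (List.perm_ext_iff_of_nodup (nodup_of_pairwise_key (pairwise_pvP attrs))
      ((nodup_enumerate attrs).filter _)).mpr ?_
    intro a
    rw [mem_pvP_iff hpre, List.mem_filter]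
    simp
  refine (hPF.append_right (pvR attrs)).trans ?_
  exact List.filter_append_perm (fun p => pvOrder.contains p.2.1) (PySem.List.enumerate attrs)

theorem sorted_eq {attrs : List (String × String)} (hpre : (attrs.map (fun kv => kv.1)).Nodup) :
    PySem.List.sorted (PySem.List.enumerate attrs) pvKey = pvP attrs ++ pvR attrs := by
  refine PySem.List.sorted_eq_of_perm_of_pairwise_lt _ _ _ (perm_pvPR hpre) ?_
  rw [List.pairwise_append]
  refine ⟨pairwise_pvP attrs, pairwise_pvR attrs, ?_⟩
  intro a ha b hb
  have ha6 : pvKey a ≤ 6 := by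
    have := (mem_pvP_iff hpre a).mp ha
    exact pvKey_le_of_mem a this.2
  have hb7 : 7 ≤ pvKey b := by
    have hmemf := List.mem_filter.mp hb
    have hnot : b.2.1 ∉ pvOrder := by simpa using hmemf.2
    rw [pvKey_of_not_mem b hnot]
    have hb0 : 0 ≤ b.1 := by
      have := (PySem.List.mem_enumerate_iff attrs 0 b).mp hmemf.1
      obtain ⟨k, hk, rfl⟩ := this
      simp
    omega
  omega

theorem loopA_fst (attrs : List (String × String)) (ord : List String)
    (parts : List String) (used : PySem.Set String) :
    (ord.foldl (fun (st : List String × PySem.Set String) key =>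
       match (PySem.Dict.mk attrs).get? key with
       | some v => (st.1 ++ [key ++ "=\"" ++ v ++ "\""], PySem.Set.add st.2 key)
       | none => st) (parts, used)).1
      = parts ++ ord.filterMap (fun k => ((PySem.Dict.mk attrs).get? k).map (fun v => k ++ "=\"" ++ v ++ "\"")) := by
  induction ord generalizing parts used with
  | nil => simp
  | cons k t ih =>
    simp only [List.foldl_cons, List.filterMap_cons]
    cases h : (PySem.Dict.mk attrs).get? k with
    | none => simp [ih]
    | some v => simp [ih]

theorem loopA_snd_mem (attrs : List (String × String)) (ord : List String)
    (parts : List String) (used : PySem.Set String) (x : String) :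
    (x ∈ (ord.foldl (fun (st : List String × PySem.Set String) key =>
       match (PySem.Dict.mk attrs).get? key with
       | some v => (st.1 ++ [key ++ "=\"" ++ v ++ "\""], PySem.Set.add st.2 key)
       | none => st) (parts, used)).2)
      ↔ x ∈ used ∨ (x ∈ ord ∧ ((PySem.Dict.mk attrs).get? x).isSome) := by
  induction ord generalizing parts used with
  | nil => simp
  | cons k t ih =>
    simp only [List.foldl_cons]
    cases h : (PySem.Dict.mk attrs).get? k with
    | none =>
      rw [ih]
      by_cases hxk : x = k
      · subst hxk
        simp [h]
      · simp [hxk]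
    | some v =>
      rw [ih]
      rw [PySem.Set.mem_add]
      by_cases hxk : x = k
      · subst hxk
        simp [h]
      · simp [hxk]

theorem get?_isSome_of_mem {attrs : List (String × String)} {kv : String × String}
    (h : kv ∈ attrs) : ((PySem.Dict.mk attrs).get? kv.1).isSome := by
  induction attrs with
  | nil => simp at h
  | cons a t ih =>
    rw [show (a :: t : List (String × String)) = (a.1, a.2) :: t by simp] at *
    rw [PySem.Dict.get?_mk_cons]
    by_cases hk : a.1 = kv.1
    · simp [hk]
    · have : kv ∈ t := by
        rcases List.mem_cons.mp h with h' | h'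
        · exact absurd (congrArg Prod.fst h'.symm) hk
        · exact h'
      simp only [beq_iff_eq, hk, if_false]
      exact ih this

theorem find_enum_get (attrs : List (String × String)) (k : String) (s : Int)
    (g : String × String → String) :
    ((PySem.List.enumerate attrs s).find? (fun p => p.2.1 == k)).map (fun p => g p.2)
      = ((PySem.Dict.mk attrs).get? k).map (fun v => g (k, v)) := by
  induction attrs generalizing s with
  | nil => simp [PySem.List.enumerate, PySem.Dict.get?]
  | cons a t ih =>
    rw [show (a :: t : List (String × String)) = (a.1, a.2) :: t by simp]
    rw [PySem.List.enumerate_cons, List.find?_cons, PySem.Dict.get?_mk_cons]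
    by_cases hk : a.1 = k
    · simp [hk]
    · have hbeq : ((s, (a.1, a.2)).2.1 == k) = false := by simpa using hk
      simp only [hbeq]
      exact ih (s + 1)

theorem filter_map_enum (attrs : List (String × String)) (s : Int)
    (q : String × String → Bool) (g : String × String → String) :
    (((PySem.List.enumerate attrs s).filter (fun p => q p.2)).map (fun p => g p.2))
      = (attrs.filter q).map g := by
  induction attrs generalizing s with
  | nil => simp [PySem.List.enumerate]
  | cons a t ih =>
    rw [PySem.List.enumerate_cons, List.filter_cons, List.filter_cons]
    cases hq : q a with
    | true => simp [ih]
    | false => simp [ih]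

theorem chars_join_nonempty (z : List Char) (rest : List (List Char)) :
    PySem.Chars.join [] (z :: rest) = z ++ PySem.Chars.join [] rest := by
  cases rest with
  | nil => simp [PySem.Chars.join_singleton, PySem.Chars.join_nil]
  | cons y t => rw [PySem.Chars.join_cons_cons]; simp

theorem chars_join_shift (x : List Char) (M : List (List Char)) :
    PySem.Chars.join [' '] (x :: M) = x ++ PySem.Chars.join [] (M.map (fun cs => ' ' :: cs)) := by
  induction M generalizing x with
  | nil => simp [PySem.Chars.join_singleton, PySem.Chars.join_nil]
  | cons y t ih =>
    rw [PySem.Chars.join_cons_cons, ih y]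
    rw [List.map_cons, chars_join_nonempty]
    simp

theorem str_join_shift (s : String) (L : List String) :
    PySem.Str.join " " (s :: L) = s ++ PySem.Str.join "" (L.map (fun x => " " ++ x)) := by
  simp only [PySem.Str.join]
  rw [show (" " : String).toList = [' '] from rfl, show ("" : String).toList = [] from rfl]
  rw [List.map_cons, chars_join_shift]
  conv_rhs => rw [show s = String.ofList s.toList from (String.ofList_toList (s := s)).symm]
  rw [← String.ofList_append]
  have hmap : List.map (fun cs => ' ' :: cs) (List.map String.toList L)
      = List.map String.toList (List.map (fun x => " " ++ x) L) := by
    rw [List.map_map, List.map_map]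
    refine List.map_congr_left ?_
    intro x _
    simp [Function.comp, String.toList_append]
  rw [hmap]

theorem maps_eq (attrs : List (String × String)) :
    (pvP attrs ++ pvR attrs).map (fun p => " " ++ p.2.1 ++ "=\"" ++ p.2.2 ++ "\"")
      = ((pvOrder.filterMap (fun k => ((PySem.Dict.mk attrs).get? k).map (fun v => k ++ "=\"" ++ v ++ "\"")))
          ++ (attrs.filter (fun kv => !(pvOrder.contains kv.1))).map (fun kv => kv.1 ++ "=\"" ++ kv.2 ++ "\"")).map
        (fun x => " " ++ x) := by
  rw [List.map_append, List.map_append]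
  congr 1
  · rw [pvP, List.map_filterMap, List.map_filterMap]
    refine List.filterMap_congr ?_
    intro k _
    have h := find_enum_get attrs k 0 (fun kv => " " ++ kv.1 ++ "=\"" ++ kv.2 ++ "\"")
    rw [h]
    cases (PySem.Dict.mk attrs).get? k with
    | none => rfl
    | some v => simp [String.append_assoc]
  · rw [pvR]
    have h := filter_map_enum attrs 0 (fun kv => !(pvOrder.contains kv.1))
      (fun kv => " " ++ kv.1 ++ "=\"" ++ kv.2 ++ "\"")
    rw [h, List.map_map]
    refine List.map_congr_left ?_
    intro kv _
    simp [Function.comp, String.append_assoc]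

theorem main_eq (attrs : List (String × String)) (hpre : (attrs.map (fun kv => kv.1)).Nodup) :
    serialize_img attrs = serialize_img_alt attrs := by
  simp only [serialize_img, serialize_img_alt]
  rw [sorted_eq hpre]
  rw [loopA_fst]
  rw [PySem.List.foldl_congr_mem _ _
    (fun ps kv => if !(pvOrder.contains kv.1) then ps ++ [kv.1 ++ "=\"" ++ kv.2 ++ "\""] else ps) _ ?_]
  · rw [PySem.List.foldl_append_if]
    rw [maps_eq attrs]
    congr 1
    rw [show ((["<img"] ++ pvOrder.filterMap (fun k => ((PySem.Dict.mk attrs).get? k).map (fun v => k ++ "=\"" ++ v ++ "\"")))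
          ++ (attrs.filter (fun kv => !(pvOrder.contains kv.1))).map (fun kv => kv.1 ++ "=\"" ++ kv.2 ++ "\""))
        = "<img" :: ((pvOrder.filterMap (fun k => ((PySem.Dict.mk attrs).get? k).map (fun v => k ++ "=\"" ++ v ++ "\"")))
          ++ (attrs.filter (fun kv => !(pvOrder.contains kv.1))).map (fun kv => kv.1 ++ "=\"" ++ kv.2 ++ "\"")) by simp]
    rw [str_join_shift]
  · intro ps kv hkv
    have hsome := get?_isSome_of_mem hkv
    have hmem := loopA_snd_mem attrs pvOrder ["<img"] PySem.Set.empty kv.1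
    by_cases hk : kv.1 ∈ pvOrder
    · have h1 : PySem.Set.contains (pvOrder.foldl
        (fun (st : List String × PySem.Set String) key =>
          match (PySem.Dict.mk attrs).get? key with
          | some v => (st.1 ++ [key ++ "=\"" ++ v ++ "\""], PySem.Set.add st.2 key)
          | none => st) (["<img"], PySem.Set.empty)).2 kv.1 = true := by
        rw [PySem.Set.contains_iff, hmem]
        right
        exact ⟨hk, hsome⟩
      rw [h1]
      simp
      exact hk
    · have h1 : PySem.Set.contains (pvOrder.foldl
        (fun (st : List String × PySem.Set String) key =>
          match (PySem.Dict.mk attrs).get? key with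
          | some v => (st.1 ++ [key ++ "=\"" ++ v ++ "\""], PySem.Set.add st.2 key)
          | none => st) (["<img"], PySem.Set.empty)).2 kv.1 = false := by
        rw [Bool.eq_false_iff]
        intro hc
        rw [PySem.Set.contains_iff, hmem] at hc
        rcases hc with hc | hc
        · simp [PySem.Set.empty] at hc
        · exact hk hc.1
      rw [h1]
      simp
      exact hk

-- ===== VERDICT (by name: the statement is the Claim_ definition above) =====
theorem serialize_img_spec : Claim_equal_serialize_img := by
  intro attrs _ hpre
  exact main_eq attrs hpre
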